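-- pv_equiv track=rewrite | github.com/starkizard/MLH-LocalHackDay | sortAList/stalinSort.py | stalinSort
-- ===== SOURCE A (Python) =====
-- def stalinSort(l):
--     m=float("-inf")
--     sortl=[]
--     for i in l:
--         if(i>=m):
--             sortl.append(i)
--             m=i
--     return sortl
-- ===== SOURCE B (Python) =====
-- def stalinSort(l):
--     # two-pass: inclusive prefix-maximum table, then filter elements equal to their prefix max
--     maxes = []
--     m = None
--     for x in l:
--         m = x if m is None else max(m, x)
--         maxes.append(m)
--     return [x for x, mx in zip(l, maxes) if x == mx]
-- ===== Notes on version B (the rewrite author's own statement) =====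
-- stated objective: alternative
-- what changed: Replaces the single accumulator-threaded keep/drop scan with a two-pass decomposition: first build the inclusive prefix-maximum table, then filter the elements equal to their prefix maximum via zip.
import Mathlib
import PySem

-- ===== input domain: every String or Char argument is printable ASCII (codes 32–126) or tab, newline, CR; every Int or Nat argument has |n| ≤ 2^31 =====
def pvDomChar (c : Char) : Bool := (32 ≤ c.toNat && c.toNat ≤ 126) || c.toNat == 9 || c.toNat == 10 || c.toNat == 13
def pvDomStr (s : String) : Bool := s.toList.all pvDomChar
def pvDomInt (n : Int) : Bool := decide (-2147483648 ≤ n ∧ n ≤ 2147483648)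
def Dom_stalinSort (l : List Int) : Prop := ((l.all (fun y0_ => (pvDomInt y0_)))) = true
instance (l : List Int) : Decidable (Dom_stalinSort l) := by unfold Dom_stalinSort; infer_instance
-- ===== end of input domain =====

-- B replaces A's accumulator-threaded keep/drop scan with a two-pass decomposition
-- (prefix-maximum table, then a zip/filter pass); same cost, proved equal on all inputs.

-- ===== PORT A =====
-- A's running max starts at float("-inf"): modelled as Option Int, none = -inf (any int ≥ it).
def stalinSortLoop : List Int → Option Int → List Int
  | [], _ => []
  | i :: t, none => i :: stalinSortLoop t (some i)
  | i :: t, some m => if m ≤ i then i :: stalinSortLoop t (some i) else stalinSortLoop t (some m)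

def stalinSort (l : List Int) : List Int := stalinSortLoop l none

-- ===== PORT B =====
-- first pass of Source B: the inclusive prefix-maximum table (m = None before the first element)
def prefixMaxes : Option Int → List Int → List Int
  | _, [] => []
  | none, x :: t => x :: prefixMaxes (some x) t
  | some m, x :: t => max m x :: prefixMaxes (some (max m x)) t

def stalinSort_alt (l : List Int) : List Int :=
  let maxes := prefixMaxes none l
  ((l.zip maxes).filter (fun p => p.1 == p.2)).map Prod.fst

-- ===== PRECONDITION & SPEC =====
def Spec_stalinSort (l : List Int) (out : List Int) : Prop := out = stalinSort_alt l
instance (l : List Int) (out : List Int) : Decidable (Spec_stalinSort l out) := by unfold Spec_stalinSort; infer_instance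

-- ===== CLAIM (what is proved, stated in full; the proofs are below) =====
def Claim_equal_stalinSort : Prop := ∀ (l : List Int), Dom_stalinSort l → Spec_stalinSort l (stalinSort l)

-- ===== LEMMAS AND PROOFS =====
theorem stalinSortLoop_eq_filter (t : List Int) : ∀ (m : Int),
    stalinSortLoop t (some m)
      = ((t.zip (prefixMaxes (some m) t)).filter (fun p => p.1 == p.2)).map Prod.fst := by
  induction t with
  | nil => intro m; rfl
  | cons x t ih =>
    intro m
    by_cases h : m ≤ x
    · have hx : max m x = x := max_eq_right h
      simp [stalinSortLoop, prefixMaxes, h, hx, List.zip, ih]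
    · have hx : max m x = m := max_eq_left (by omega)
      have hne : (x == m) = false := by
        simp only [beq_eq_false_iff_ne]; intro he; exact h (le_of_eq he.symm)
      simp [stalinSortLoop, prefixMaxes, h, hx, List.zip, hne, ih]

-- ===== VERDICT (by name: the statement is the Claim_ definition above) =====
theorem stalinSort_spec : Claim_equal_stalinSort := by
  intro l _
  unfold Spec_stalinSort stalinSort stalinSort_alt
  cases l with
  | nil => rfl
  | cons x t =>
    simp [stalinSortLoop, prefixMaxes, List.zip, stalinSortLoop_eq_filter]
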